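-- pv_equiv track=rewrite | github.com/linardsb/ugoki-iOS-Android-app | apps/api/src/modules/social/service.py | _get_title_for_level
-- ===== SOURCE A (Python) =====
-- def _get_title_for_level(level: int) -> str:
--     """Get title for a level."""
--     titles = {
--         1: "Beginner",
--         5: "Apprentice",
--         10: "Practitioner",
--         15: "Dedicated",
--         20: "Committed",
--         25: "Warrior",
--         30: "Champion",
--         40: "Master",
--         50: "Grandmaster",
--         75: "Legend",
--         100: "Transcendent",
--     }
--     title = "Beginner"
--     for lvl, t in sorted(titles.items()):
--         if level >= lvl:
--             title = t
--     return title
-- ===== SOURCE B (Python) =====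
-- _THRESHOLDS = [1, 5, 10, 15, 20, 25, 30, 40, 50, 75, 100]
-- _TITLES = ["Beginner", "Apprentice", "Practitioner", "Dedicated", "Committed",
--            "Warrior", "Champion", "Master", "Grandmaster", "Legend", "Transcendent"]
--
--
-- def _get_title_for_level(level: int) -> str:
--     """Get title for a level via binary search over precomputed thresholds."""
--     lo, hi = 0, len(_THRESHOLDS)
--     while lo < hi:
--         mid = (lo + hi) // 2
--         if level < _THRESHOLDS[mid]:
--             hi = mid
--         else:
--             lo = mid + 1
--     return "Beginner" if lo == 0 else _TITLES[lo - 1]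
-- ===== Notes on version B (the rewrite author's own statement) =====
-- stated objective: alternative
-- what changed: Replaces the full linear scan over all sorted dict items with a binary search (hand-rolled bisect_right) into a precomputed threshold table, plus an index lookup into a parallel titles list.
import Mathlib
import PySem

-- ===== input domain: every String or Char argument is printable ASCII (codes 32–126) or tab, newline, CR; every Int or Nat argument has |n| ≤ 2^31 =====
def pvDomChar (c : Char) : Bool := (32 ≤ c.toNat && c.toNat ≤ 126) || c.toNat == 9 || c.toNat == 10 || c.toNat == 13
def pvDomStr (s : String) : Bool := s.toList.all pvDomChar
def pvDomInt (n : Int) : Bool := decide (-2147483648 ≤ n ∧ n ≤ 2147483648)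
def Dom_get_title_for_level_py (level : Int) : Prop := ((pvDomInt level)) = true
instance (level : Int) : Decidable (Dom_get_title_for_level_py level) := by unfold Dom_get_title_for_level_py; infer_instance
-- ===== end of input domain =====

-- B replaces A's linear scan of the sorted title dict with a binary search over a precomputed threshold table.
-- ===== PORT A =====
-- sorted(titles.items()) sorts the items list (keys here are already increasing); the loop folds over it.
def get_title_for_level_py (level : Int) : String :=
  let titles : List (Int × String) :=
    [(1, "Beginner"), (5, "Apprentice"), (10, "Practitioner"), (15, "Dedicated"),
     (20, "Committed"), (25, "Warrior"), (30, "Champion"), (40, "Master"),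
     (50, "Grandmaster"), (75, "Legend"), (100, "Transcendent")]
  (PySem.List.sorted titles (fun p => p.1) false).foldl
    (fun title p => if level ≥ p.1 then p.2 else title) "Beginner"

-- ===== PORT B =====
def pvThresholds : List Int := [1, 5, 10, 15, 20, 25, 30, 40, 50, 75, 100]
def pvTitles : List String :=
  ["Beginner", "Apprentice", "Practitioner", "Dedicated", "Committed",
   "Warrior", "Champion", "Master", "Grandmaster", "Legend", "Transcendent"]

-- the while-loop of Source B, recursion on hi - lo
def pvBisectRight (level : Int) (lo hi : Nat) : Nat :=
  if lo < hi then
    let mid := (lo + hi) / 2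
    if level < pvThresholds.getD mid 0 then pvBisectRight level lo mid
    else pvBisectRight level (mid + 1) hi
  else lo
termination_by hi - lo
decreasing_by all_goals omega

def get_title_for_level_py_alt (level : Int) : String :=
  let lo := pvBisectRight level 0 pvThresholds.length
  if lo == 0 then "Beginner" else pvTitles.getD (lo - 1) ""

-- ===== PRECONDITION & SPEC =====
def Spec_get_title_for_level_py (level : Int) (out : String) : Prop := out = get_title_for_level_py_alt level
instance (level : Int) (out : String) : Decidable (Spec_get_title_for_level_py level out) := by unfold Spec_get_title_for_level_py; infer_instance

-- ===== CLAIM (what is proved, stated in full; the proofs are below) =====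
def Claim_equal_get_title_for_level_py : Prop := ∀ (level : Int), Dom_get_title_for_level_py level → Spec_get_title_for_level_py level (get_title_for_level_py level)

-- ===== LEMMAS AND PROOFS =====

-- ===== VERDICT (by name: the statement is the Claim_ definition above) =====
set_option maxHeartbeats 2000000 in
theorem get_title_for_level_py_spec : Claim_equal_get_title_for_level_py := by
  intro level _
  unfold Spec_get_title_for_level_py get_title_for_level_py get_title_for_level_py_alt
  simp only [ge_iff_le]
  rw [show PySem.List.sorted ([(1, "Beginner"), (5, "Apprentice"), (10, "Practitioner"), (15, "Dedicated"),
     (20, "Committed"), (25, "Warrior"), (30, "Champion"), (40, "Master"),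
     (50, "Grandmaster"), (75, "Legend"), (100, "Transcendent")] : List (Int × String)) (fun p => p.1) false = [(1, "Beginner"), (5, "Apprentice"), (10, "Practitioner"), (15, "Dedicated"),
     (20, "Committed"), (25, "Warrior"), (30, "Champion"), (40, "Master"),
     (50, "Grandmaster"), (75, "Legend"), (100, "Transcendent")] from by decide]
  simp only [List.foldl]
  set_option maxRecDepth 8192 in
  simp [pvBisectRight, pvThresholds, pvTitles]
  split_ifs <;> first | rfl | omega | decide | simp_all
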